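-- pv_equiv track=rewrite | github.com/VatroslavBB/OOP_seminarski | cleanup/BooleanFunctionClass.py | FindWeakest
-- ===== SOURCE A (Python) =====
-- def FindWeakest(func):
--     scale = {"|": 1, "&": 2, "!": 3}
--     weakest = 5
--     index = -1
--     parentCnt = 0
--     for i in range(len(func)):
--         parentCnt += (func[i] == "(")*1 - (func[i] == ")")*1
--         if parentCnt == 0 and func[i] in scale:
--             if weakest > scale[func[i]]:
--                 weakest = scale[func[i]]
--                 index = i
--     return index
-- ===== SOURCE B (Python) =====
-- def FindWeakest(func):
--     # priority-ordered scans: '|' is weakest, then '&', then '!'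
--     for sym in "|&!":
--         parentCnt = 0
--         for i, c in enumerate(func):
--             parentCnt += (c == "(") - (c == ")")
--             if parentCnt == 0 and c == sym:
--                 return i
--     return -1
-- ===== Notes on version B (the rewrite author's own statement) =====
-- stated objective: alternative
-- what changed: Replaces A's single running-minimum sweep over a precedence table with three priority-ordered plain scans ('|' then '&' then '!'), each returning the first symbol found at parenthesis depth 0.
import Mathlib
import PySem

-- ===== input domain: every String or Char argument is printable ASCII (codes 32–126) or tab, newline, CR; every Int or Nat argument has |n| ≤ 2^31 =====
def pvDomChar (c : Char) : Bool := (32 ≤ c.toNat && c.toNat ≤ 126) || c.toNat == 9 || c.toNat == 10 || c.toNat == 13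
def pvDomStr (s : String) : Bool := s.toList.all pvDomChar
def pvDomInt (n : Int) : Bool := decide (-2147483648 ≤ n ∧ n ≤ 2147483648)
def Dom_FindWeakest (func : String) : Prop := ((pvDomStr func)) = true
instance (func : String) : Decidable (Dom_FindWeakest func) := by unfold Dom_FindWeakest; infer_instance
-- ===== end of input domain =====

-- B replaces A's running-minimum sweep by three priority-ordered plain depth-0 scans; same cost, alternative decomposition.

-- ===== PORT A =====
-- scale = {"|": 1, "&": 2, "!": 3}: membership/lookup in A's dict
def pvScale? (c : Char) : Option Int :=
  if c = '|' then some 1 else if c = '&' then some 2 else if c = '!' then some 3 else none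

-- the for-loop of A: state (weakest, index, parentCnt), position i
def pvALoop : List Char → Int → Int → Int → Nat → Int
  | [], _, index, _, _ => index
  | c :: rest, weakest, index, parentCnt, i =>
    let cnt := parentCnt + (if c = '(' then (1:Int) else 0) - (if c = ')' then (1:Int) else 0)
    if cnt = 0 then
      match pvScale? c with
      | some s =>
        if weakest > s then pvALoop rest s (Int.ofNat i) cnt (i+1)
        else pvALoop rest weakest index cnt (i+1)
      | none => pvALoop rest weakest index cnt (i+1)
    else pvALoop rest weakest index cnt (i+1)

def FindWeakest (func : String) : Int := pvALoop func.toList 5 (-1) 0 0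

-- ===== PORT B =====
-- one plain scan for symbol sym: first index where sym occurs at parenthesis depth 0
def pvBScan (sym : Char) : List Char → Int → Nat → Option Int
  | [], _, _ => none
  | c :: rest, parentCnt, i =>
    let cnt := parentCnt + (if c = '(' then (1:Int) else 0) - (if c = ')' then (1:Int) else 0)
    if cnt = 0 ∧ c = sym then some (Int.ofNat i) else pvBScan sym rest cnt (i+1)

-- 'for sym in "|&!": … return i' / final 'return -1'
def FindWeakest_alt (func : String) : Int :=
  match pvBScan '|' func.toList 0 0 with
  | some i => i
  | none =>
    match pvBScan '&' func.toList 0 0 with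
    | some i => i
    | none =>
      match pvBScan '!' func.toList 0 0 with
      | some i => i
      | none => -1

-- ===== PRECONDITION & SPEC =====
def Spec_FindWeakest (func : String) (out : Int) : Prop := out = FindWeakest_alt func
instance (func : String) (out : Int) : Decidable (Spec_FindWeakest func out) := by unfold Spec_FindWeakest; infer_instance

-- ===== CLAIM (what is proved, stated in full; the proofs are below) =====
def Claim_equal_FindWeakest : Prop := ∀ (func : String), Dom_FindWeakest func → Spec_FindWeakest func (FindWeakest func)

-- ===== LEMMAS AND PROOFS =====

-- weakest = 1: A's loop never updates again
theorem pvALoop_one (l : List Char) : ∀ (idx cnt : Int) (i : Nat),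
    pvALoop l 1 idx cnt i = idx := by
  induction l with
  | nil => intro idx cnt i; rfl
  | cons c rest ih =>
    intro idx cnt i
    simp only [pvALoop, pvScale?]
    split_ifs <;> simp_all

-- weakest = 2: only a depth-0 '|' can still update
theorem pvALoop_two (l : List Char) : ∀ (idx cnt : Int) (i : Nat),
    pvALoop l 2 idx cnt i = (pvBScan '|' l cnt i).getD idx := by
  induction l with
  | nil => intro idx cnt i; rfl
  | cons c rest ih =>
    intro idx cnt i
    simp only [pvALoop, pvBScan, pvScale?]
    split_ifs <;> simp_all [pvALoop_one]

-- weakest = 3: a depth-0 '|' or '&' can still update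
theorem pvALoop_three (l : List Char) : ∀ (idx cnt : Int) (i : Nat),
    pvALoop l 3 idx cnt i
      = (pvBScan '|' l cnt i).getD ((pvBScan '&' l cnt i).getD idx) := by
  induction l with
  | nil => intro idx cnt i; rfl
  | cons c rest ih =>
    intro idx cnt i
    simp only [pvALoop, pvBScan, pvScale?]
    split_ifs <;> simp_all [pvALoop_one, pvALoop_two]

-- weakest = 5 (initial state): any depth-0 operator can update
theorem pvALoop_five (l : List Char) : ∀ (idx cnt : Int) (i : Nat),
    pvALoop l 5 idx cnt i
      = (pvBScan '|' l cnt i).getD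
          ((pvBScan '&' l cnt i).getD ((pvBScan '!' l cnt i).getD idx)) := by
  induction l with
  | nil => intro idx cnt i; rfl
  | cons c rest ih =>
    intro idx cnt i
    simp only [pvALoop, pvBScan, pvScale?]
    split_ifs <;> simp_all [pvALoop_one, pvALoop_two, pvALoop_three]

-- ===== VERDICT (by name: the statement is the Claim_ definition above) =====
theorem FindWeakest_spec : Claim_equal_FindWeakest := by
  intro func _
  unfold Spec_FindWeakest FindWeakest FindWeakest_alt
  rw [pvALoop_five]
  cases pvBScan '|' func.toList 0 0 <;> cases pvBScan '&' func.toList 0 0 <;>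
    cases pvBScan '!' func.toList 0 0 <;> rfl
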